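-- pv_equiv track=rewrite | github.com/jbaruch/speaker-toolkit | skills/presentation-creator/scripts/generate-talk-timings.py | generate_timings
-- ===== SOURCE A (Python) =====
-- def format_seconds(total_seconds):
--     """Format seconds as MM:SS."""
--     minutes = total_seconds // 60
--     secs = total_seconds % 60
--     return f"{minutes}:{secs:02d}"
--
-- def generate_timings(sections, qa_minutes=0):
--     """Generate timing lines from sections list.
--
--     Args:
--         sections: list of (name, duration_seconds) tuples
--         qa_minutes: optional Q&A duration in minutes (added before FINISH)
--
--     Returns:
--         list of "MM:SS Label" strings
--     """
--     lines = []
--     cumulative = 0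
--
--     for name, duration in sections:
--         lines.append(f"{format_seconds(cumulative)} {name}")
--         cumulative += duration
--
--     if qa_minutes > 0:
--         lines.append(f"{format_seconds(cumulative)} Q&A")
--         cumulative += qa_minutes * 60
--
--     lines.append(f"{format_seconds(cumulative)} FINISH")
--     return lines
-- ===== SOURCE B (Python) =====
-- def format_seconds(total_seconds):
--     """Format seconds as MM:SS."""
--     minutes = total_seconds // 60
--     secs = total_seconds % 60
--     return f"{minutes}:{secs:02d}"
--
-- def _emit(entries, offset):
--     """Recursively emit one timing line per entry, then the FINISH line."""
--     if not entries:
--         return [f"{format_seconds(offset)} FINISH"]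
--     (name, duration) = entries[0]
--     return [f"{format_seconds(offset)} {name}"] + _emit(entries[1:], offset + duration)
--
-- def generate_timings(sections, qa_minutes=0):
--     entries = list(sections) + ([("Q&A", qa_minutes * 60)] if qa_minutes > 0 else [])
--     return _emit(entries, 0)
-- ===== Notes on version B (the rewrite author's own statement) =====
-- stated objective: alternative
-- what changed: Replaces A's imperative single loop with mutable lines/cumulative accumulators plus a post-loop Q&A branch by a recursive decomposition: the Q&A entry is appended to the entry list up front and one recursive helper emits a line per entry and the FINISH line at the base case.
import Mathlib
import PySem

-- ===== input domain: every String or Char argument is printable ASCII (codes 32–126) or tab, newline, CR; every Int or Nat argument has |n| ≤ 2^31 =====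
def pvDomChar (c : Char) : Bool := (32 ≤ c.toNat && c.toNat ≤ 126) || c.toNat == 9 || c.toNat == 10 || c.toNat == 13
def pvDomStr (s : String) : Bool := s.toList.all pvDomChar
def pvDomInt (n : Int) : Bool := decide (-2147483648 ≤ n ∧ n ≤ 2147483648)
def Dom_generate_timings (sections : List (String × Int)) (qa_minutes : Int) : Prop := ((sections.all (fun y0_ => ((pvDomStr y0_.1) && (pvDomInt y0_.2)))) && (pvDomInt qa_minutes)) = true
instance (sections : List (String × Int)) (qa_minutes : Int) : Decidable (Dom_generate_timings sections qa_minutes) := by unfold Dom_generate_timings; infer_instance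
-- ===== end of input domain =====

-- B: recursive decomposition (Q&A entry appended to the list up front, one helper emits lines) instead of A's loop with accumulators; same O(n) cost.

-- shared helper format_seconds (identical in Source A and Source B); f"{minutes}:{secs:02d}" with 0 ≤ secs < 60
def format_seconds (total_seconds : Int) : String :=
  let minutes := PySem.Int.floordiv total_seconds 60
  let secs := PySem.Int.mod total_seconds 60
  PySem.Int.toStr minutes ++ ":" ++ (if secs < 10 then "0" ++ PySem.Int.toStr secs else PySem.Int.toStr secs)

-- ===== PORT A =====
def generate_timings (sections : List (String × Int)) (qa_minutes : Int) : List String :=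
  let st := sections.foldl (fun (st : List String × Int) p =>
      (st.1 ++ [format_seconds st.2 ++ " " ++ p.1], st.2 + p.2)) ([], 0)
  let st := if qa_minutes > 0 then (st.1 ++ [format_seconds st.2 ++ " Q&A"], st.2 + qa_minutes * 60) else st
  st.1 ++ [format_seconds st.2 ++ " FINISH"]

-- ===== PORT B =====
def pvEmit : List (String × Int) → Int → List String
  | [], offset => [format_seconds offset ++ " FINISH"]
  | (name, duration) :: rest, offset =>
      [format_seconds offset ++ " " ++ name] ++ pvEmit rest (offset + duration)

def generate_timings_alt (sections : List (String × Int)) (qa_minutes : Int) : List String :=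
  pvEmit (sections ++ (if qa_minutes > 0 then [("Q&A", qa_minutes * 60)] else [])) 0

-- ===== PRECONDITION & SPEC =====
def Spec_generate_timings (sections : List (String × Int)) (qa_minutes : Int) (out : List String) : Prop := out = generate_timings_alt sections qa_minutes
instance (sections : List (String × Int)) (qa_minutes : Int) (out : List String) : Decidable (Spec_generate_timings sections qa_minutes out) := by unfold Spec_generate_timings; infer_instance

-- ===== CLAIM (what is proved, stated in full; the proofs are below) =====
def Claim_equal_generate_timings : Prop := ∀ (sections : List (String × Int)) (qa_minutes : Int), Dom_generate_timings sections qa_minutes → Spec_generate_timings sections qa_minutes (generate_timings sections qa_minutes)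

-- ===== LEMMAS AND PROOFS =====

-- loop invariant: A's fold over the remaining sections, followed by emitting the tail E, equals lines ++ pvEmit (xs ++ E)
theorem fold_emit (E : List (String × Int)) :
    ∀ (xs : List (String × Int)) (lines : List String) (off : Int),
      (xs.foldl (fun (st : List String × Int) p =>
          (st.1 ++ [format_seconds st.2 ++ " " ++ p.1], st.2 + p.2)) (lines, off)).1
        ++ pvEmit E (xs.foldl (fun (st : List String × Int) p =>
          (st.1 ++ [format_seconds st.2 ++ " " ++ p.1], st.2 + p.2)) (lines, off)).2
      = lines ++ pvEmit (xs ++ E) off := by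
  intro xs
  induction xs with
  | nil => intro lines off; simp
  | cons p xs ih =>
      intro lines off
      simp only [List.foldl_cons, List.cons_append, pvEmit, ih, List.append_assoc]

-- ===== VERDICT (by name: the statement is the Claim_ definition above) =====
theorem generate_timings_spec : Claim_equal_generate_timings := by
  intro sections qa_minutes _
  unfold Spec_generate_timings generate_timings generate_timings_alt
  rw [← List.nil_append (pvEmit (sections ++ _) 0), ← fold_emit]
  by_cases h : qa_minutes > 0 <;> simp [h, pvEmit, String.append_assoc] <;> rfl
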